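-- pv_equiv track=rewrite | github.com/DanielZerihon/HPC | monthMaintanenceTest.py | insertNodesToDict
-- ===== SOURCE A (Python) =====
-- def insertNodesToDict(numberOfDaysInMonth, randomNodeList):
--     nodesDict = {dayNumber: [] for dayNumber in range(1, numberOfDaysInMonth + 1)}
--     randomNodeListLen = len(randomNodeList)
--     batchSize = int(randomNodeListLen / numberOfDaysInMonth)
--     restOfBatchSize = randomNodeListLen % numberOfDaysInMonth
--     batchSizeDifference = 0
--     nodeListIter = iter(randomNodeList)
--
--     for key in nodesDict.keys():
--         batchSizeDifference = 1 if key <= restOfBatchSize else 0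
--         nodeBatch = [next(nodeListIter) for node in range(batchSize + batchSizeDifference)]
--         batchSizeDifference = 0
--         nodesDict[key] += nodeBatch
--
--     return nodesDict
-- ===== SOURCE B (Python) =====
-- def insertNodesToDict(numberOfDaysInMonth, randomNodeList):
--     q, r = divmod(len(randomNodeList), numberOfDaysInMonth)
--     def offset(d):
--         return d * q + min(d, r)
--     return {day: randomNodeList[offset(day - 1):offset(day)]
--             for day in range(1, numberOfDaysInMonth + 1)}
-- ===== Notes on version B (the rewrite author's own statement) =====
-- stated objective: alternative
-- what changed: B replaces A's dict-initialize-then-mutate loop that consumes elements one by one from an iterator with a single comprehension computing each day's batch by closed-form offset arithmetic (offset(d)=d*q+min(d,r)) and contiguous slicing.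
import Mathlib
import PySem

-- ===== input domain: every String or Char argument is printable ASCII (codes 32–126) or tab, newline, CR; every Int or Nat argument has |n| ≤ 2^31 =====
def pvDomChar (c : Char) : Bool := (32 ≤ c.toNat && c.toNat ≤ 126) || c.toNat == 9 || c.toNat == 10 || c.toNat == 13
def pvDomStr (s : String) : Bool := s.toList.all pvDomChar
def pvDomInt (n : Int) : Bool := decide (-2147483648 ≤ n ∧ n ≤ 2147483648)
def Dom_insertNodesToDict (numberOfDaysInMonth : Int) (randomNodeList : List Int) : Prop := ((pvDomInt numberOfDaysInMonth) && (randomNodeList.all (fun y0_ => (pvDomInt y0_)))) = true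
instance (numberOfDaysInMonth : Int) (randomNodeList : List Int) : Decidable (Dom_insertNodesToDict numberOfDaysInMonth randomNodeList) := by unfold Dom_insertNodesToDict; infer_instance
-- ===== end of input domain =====

-- B replaces A's dict-initialize-then-mutate loop consuming an iterator element by element with a
-- single comprehension that computes each day's batch by closed-form offset arithmetic and slicing
-- (objective: alternative decomposition, same cost).

-- ===== PORT A =====
def insertNodesToDict (numberOfDaysInMonth : Int) (randomNodeList : List Int) : List (Int × List Int) :=
  let nodesDict : List (Int × List Int) :=
    (PySem.List.pyRange 1 (numberOfDaysInMonth + 1)).map (fun dayNumber => (dayNumber, []))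
  let randomNodeListLen : Int := (randomNodeList.length : Int)
  -- int(len / days): exact as floor division here — the value is only used when days > 0 and len ≥ 0,
  -- where the quotient is nonnegative so float truncation agrees with floor (len ≤ 2^31 ≪ 2^53).
  let batchSize : Int := PySem.Int.floordiv randomNodeListLen numberOfDaysInMonth
  let restOfBatchSize : Int := PySem.Int.mod randomNodeListLen numberOfDaysInMonth
  -- the iterator is the suffix of randomNodeList not yet consumed; '[next(it) for _ in range(k)]'
  -- is take/drop of k elements — exact: within Pre_ the iterator never runs dry (A never raises StopIteration).
  let step := fun (st : List (Int × List Int) × List Int) (key : Int) =>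
    let batchSizeDifference : Int := if key ≤ restOfBatchSize then 1 else 0
    let nodeBatch := st.2.take (batchSize + batchSizeDifference).toNat
    (st.1.map (fun p => if p.1 == key then (p.1, p.2 ++ nodeBatch) else p),
     st.2.drop (batchSize + batchSizeDifference).toNat)
  ((nodesDict.map Prod.fst).foldl step (nodesDict, randomNodeList)).1

-- ===== PORT B =====
def insertNodesToDict_alt (numberOfDaysInMonth : Int) (randomNodeList : List Int) : List (Int × List Int) :=
  let q : Int := PySem.Int.floordiv (randomNodeList.length : Int) numberOfDaysInMonth
  let r : Int := PySem.Int.mod (randomNodeList.length : Int) numberOfDaysInMonth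
  let offset : Int → Int := fun d => d * q + min d r
  (PySem.List.pyRange 1 (numberOfDaysInMonth + 1)).map
    (fun day => (day, PySem.List.slice randomNodeList (some (offset (day - 1))) (some (offset day))))

-- ===== PRECONDITION & SPEC =====
-- Pre_ excludes exactly numberOfDaysInMonth = 0, where A raises ZeroDivisionError (and B does too).
def Pre_insertNodesToDict (numberOfDaysInMonth : Int) (randomNodeList : List Int) : Prop :=
  numberOfDaysInMonth ≠ 0
instance (numberOfDaysInMonth : Int) (randomNodeList : List Int) : Decidable (Pre_insertNodesToDict numberOfDaysInMonth randomNodeList) := by unfold Pre_insertNodesToDict; infer_instance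

def pvWitness_insertNodesToDict : Int × List Int := (3, [1, 2, 3, 4])

def Spec_insertNodesToDict (numberOfDaysInMonth : Int) (randomNodeList : List Int) (out : List (Int × List Int)) : Prop := out = insertNodesToDict_alt numberOfDaysInMonth randomNodeList
instance (numberOfDaysInMonth : Int) (randomNodeList : List Int) (out : List (Int × List Int)) : Decidable (Spec_insertNodesToDict numberOfDaysInMonth randomNodeList out) := by unfold Spec_insertNodesToDict; infer_instance

-- ===== CLAIM (what is proved, stated in full; the proofs are below) =====
def Claim_equal_insertNodesToDict : Prop := ∀ (numberOfDaysInMonth : Int) (randomNodeList : List Int), Dom_insertNodesToDict numberOfDaysInMonth randomNodeList → Pre_insertNodesToDict numberOfDaysInMonth randomNodeList → Spec_insertNodesToDict numberOfDaysInMonth randomNodeList (insertNodesToDict numberOfDaysInMonth randomNodeList)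

-- ===== LEMMAS AND PROOFS =====

/-- Batch size of day `key` in A's loop, as a Nat. -/
def pvSz (q r key : Int) : Nat := (q + (if key ≤ r then (1 : Int) else 0)).toNat

/-- A's loop body, named so lemmas can talk about it (definitionally A's inline `step`). -/
def pvStep (q r : Int) (st : List (Int × List Int) × List Int) (key : Int) :
    List (Int × List Int) × List Int :=
  (st.1.map (fun p => if p.1 == key then (p.1, p.2 ++ st.2.take (pvSz q r key)) else p),
   st.2.drop (pvSz q r key))

/-- What A's loop appends, day after day, consuming the iterator suffix `ys`. -/
def pvScan (q r : Int) : List Int → List Int → List (Int × List Int)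
  | [], _ => []
  | k :: ks, ys => (k, ys.take (pvSz q r k)) :: pvScan q r ks (ys.drop (pvSz q r k))

/-- B's offset. -/
def pvOff (q r d : Int) : Int := d * q + min d r

lemma pv_map_untouched (k : Int) (batch : List Int) (l : List (Int × List Int))
    (h : ∀ p ∈ l, p.1 ≠ k) :
    l.map (fun p => if p.1 == k then (p.1, p.2 ++ batch) else p) = l := by
  induction l with
  | nil => rfl
  | cons a t ih =>
      simp only [List.map_cons]
      rw [if_neg (by simpa using h a (by simp)), ih (fun p hp => h p (by simp [hp]))]

/-- A's fold over the not-yet-processed keys, with already-processed entries `done` in front. -/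
lemma pv_foldl_scan (q r : Int) (ks : List Int) (done : List (Int × List Int)) (ys : List Int)
    (hdone : ∀ p ∈ done, p.1 ∉ ks) (hnd : ks.Nodup) :
    (ks.foldl (pvStep q r) (done ++ ks.map (fun d => (d, [])), ys)).1
      = done ++ pvScan q r ks ys := by
  induction ks generalizing done ys with
  | nil => simp [pvScan]
  | cons k ks ih =>
      have hnd' := hnd
      rw [List.nodup_cons] at hnd'
      obtain ⟨hk, hndks⟩ := hnd'
      simp only [List.foldl_cons, List.map_cons]
      have hstep : pvStep q r (done ++ (k, []) :: ks.map (fun d => (d, [])), ys) k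
          = ((done ++ [(k, ys.take (pvSz q r k))]) ++ ks.map (fun d => (d, [])),
             ys.drop (pvSz q r k)) := by
        simp only [pvStep, List.map_append, List.map_cons]
        rw [pv_map_untouched k _ done (fun p hp => by
              have := hdone p hp; simp at this; exact this.1),
            pv_map_untouched k _ (ks.map (fun d => (d, []))) (by
              intro p hp; simp only [List.mem_map] at hp
              obtain ⟨d, hd, rfl⟩ := hp; exact fun h => hk (h ▸ hd))]
        simp
      rw [hstep, ih (done ++ [(k, ys.take (pvSz q r k))]) (ys.drop (pvSz q r k))
            (by intro p hp
                rcases List.mem_append.mp hp with h | h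
                · exact fun hin => hdone p h (List.mem_cons_of_mem _ hin)
                · simp only [List.mem_singleton] at h; rw [h]; simpa using hk)
            hndks]
      simp [pvScan]

lemma pv_off_succ (q r d : Int) (hq : 0 ≤ q) (hd : 0 ≤ d) :
    pvOff q r (d + 1) = pvOff q r d + (pvSz q r (d + 1) : Int) := by
  simp only [pvOff, pvSz]
  split_ifs with h <;> [rw [Int.toNat_of_nonneg (by omega)]; rw [Int.toNat_of_nonneg (by omega)]] <;> ring_nf <;> omega

lemma pv_off_nonneg (q r d : Int) (hq : 0 ≤ q) (hr : 0 ≤ r) (hd : 0 ≤ d) :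
    0 ≤ pvOff q r d := by
  have h1 : 0 ≤ d * q := mul_nonneg hd hq
  have h2 : 0 ≤ min d r := le_min hd hr
  simp only [pvOff]; omega

/-- Scan over consecutive days = map of slices. -/
lemma pv_scan_slice (xs : List Int) (q r : Int) (hq : 0 ≤ q) (hr : 0 ≤ r) :
    ∀ (c : Nat) (d : Int), 0 ≤ d →
      pvScan q r (PySem.List.pyRange (d + 1) (d + 1 + (c : Int))) (xs.drop (pvOff q r d).toNat)
        = (PySem.List.pyRange (d + 1) (d + 1 + (c : Int))).map
            (fun k => (k, PySem.List.slice xs (some (pvOff q r (k - 1))) (some (pvOff q r k)))) := by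
  intro c
  induction c with
  | zero =>
      intro d _
      rw [PySem.List.pyRange_one_eq_nil (by omega)]
      simp [pvScan]
  | succ c ih =>
      intro d hd
      have hlt : d + 1 < d + 1 + ((c : Int) + 1) := by omega
      have hcast : d + 1 + ((c + 1 : Nat) : Int) = d + 1 + ((c : Int) + 1) := by push_cast; ring
      rw [hcast, PySem.List.pyRange_one_cons hlt]
      have hoff0 : 0 ≤ pvOff q r d := pv_off_nonneg q r d hq hr hd
      have hoff1 : 0 ≤ pvOff q r (d + 1) := pv_off_nonneg q r (d + 1) hq hr (by omega)
      have hsucc := pv_off_succ q r d hq hd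
      have hsz : pvSz q r (d + 1) = (pvOff q r (d + 1)).toNat - (pvOff q r d).toNat := by omega
      have hhead : (xs.drop (pvOff q r d).toNat).take (pvSz q r (d + 1))
          = PySem.List.slice xs (some (pvOff q r (d + 1 - 1))) (some (pvOff q r (d + 1))) := by
        rw [PySem.List.slice_toNat xs (by simpa using hoff0) hoff1]
        simp only [add_sub_cancel_right]
        rw [hsz]
      have htail : (xs.drop (pvOff q r d).toNat).drop (pvSz q r (d + 1))
          = xs.drop (pvOff q r (d + 1)).toNat := by
        rw [List.drop_drop]; congr 1; omega
      simp only [pvScan, List.map_cons, hhead, htail]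
      have harg : d + 1 + ((c : Int) + 1) = (d + 1) + 1 + (c : Int) := by ring
      rw [harg]
      exact congrArg _ (ih (d + 1) (by omega))

-- ===== VERDICT (by name: the statement is the Claim_ definition above) =====
theorem insertNodesToDict_spec : Claim_equal_insertNodesToDict := by
  intro m xs _hdom hpre
  unfold Spec_insertNodesToDict insertNodesToDict insertNodesToDict_alt
  by_cases hm : m < 0
  · rw [PySem.List.pyRange_one_eq_nil (by omega)]
    simp
  · have hmpos : 0 < m := by
      rcases lt_trichotomy m 0 with h | h | h
      · exact absurd h hm
      · exact absurd h hpre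
      · exact h
    set n : Int := (xs.length : Int) with hn
    set q : Int := PySem.Int.floordiv n m with hqdef
    set r : Int := PySem.Int.mod n m with hrdef
    have hq : 0 ≤ q := by
      rw [hqdef, PySem.Int.floordiv_eq_ediv_of_pos hmpos]
      exact Int.ediv_nonneg (by simp [hn]) (le_of_lt hmpos)
    have hr : 0 ≤ r := hrdef ▸ PySem.Int.mod_nonneg n hmpos
    -- the keys iterated over are the dict's keys = the range
    have hkeys : ((PySem.List.pyRange 1 (m + 1)).map (fun d => ((d : Int), ([] : List Int)))).map Prod.fst
        = PySem.List.pyRange 1 (m + 1) := by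
      rw [List.map_map]
      exact (List.map_congr_left fun d _ => rfl).trans (List.map_id _)
    simp only [hkeys]
    -- A's inline step is pvStep q r (definitionally)
    have hfold := pv_foldl_scan q r (PySem.List.pyRange 1 (m + 1)) [] xs
      (by simp) (PySem.List.nodup_pyRange_one 1 (m + 1))
    simp only [List.nil_append] at hfold
    rw [show (PySem.List.pyRange 1 (m+1)).foldl
          (fun (st : List (Int × List Int) × List Int) (key : Int) =>
            (st.1.map (fun p => if p.1 == key then (p.1, p.2 ++ st.2.take (q + (if key ≤ r then (1:Int) else 0)).toNat) else p),
             st.2.drop (q + (if key ≤ r then (1:Int) else 0)).toNat))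
          ((PySem.List.pyRange 1 (m+1)).map (fun d => (d, [])), xs)
        = (PySem.List.pyRange 1 (m+1)).foldl (pvStep q r)
          ((PySem.List.pyRange 1 (m+1)).map (fun d => (d, [])), xs) from rfl, hfold]
    -- now relate the scan to B's slices
    have hrange : PySem.List.pyRange 1 (m + 1)
        = PySem.List.pyRange ((0 : Int) + 1) ((0 : Int) + 1 + (m.toNat : Int)) := by
      congr 1 <;> omega
    have := pv_scan_slice xs q r hq hr m.toNat 0 le_rfl
    rw [show pvOff q r 0 = 0 by simp [pvOff, min_eq_left hr], Int.toNat_zero, List.drop_zero] at this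
    rw [hrange, this]
    rfl
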